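-- pv_equiv track=rewrite | github.com/Dinca2/Seven-Wonders-Game | Card.py | list_view
-- ===== SOURCE A (Python) =====
-- def list_view(list_to_view):
--     list_dict = {}
--     for x in list_to_view:
--         if x in list_dict:
--             list_dict[x] += 1
--         else:
--             list_dict[x] = 1
--     list_view = ""
--     for i, x in enumerate(list(list_dict.keys())):
--         if x == "free" or x[:5] == "EVENT":
--             list_view = x
--         elif i == len(list_dict) - 1:
--             list_view += (str(list_dict[x]) + " " + x)
--         else:
--             list_view += (str(list_dict[x]) + " " + x  + ", ")
--     return list_view
-- ===== SOURCE B (Python) =====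
-- def list_view(list_to_view):
--     keys = list(dict.fromkeys(list_to_view))
--     prefix = ""
--     parts = []
--     for x in reversed(keys):
--         if x == "free" or x[:5] == "EVENT":
--             prefix = x
--             break
--         parts.append(str(list_to_view.count(x)) + " " + x)
--     return prefix + ", ".join(reversed(parts))
-- ===== Notes on version B (the rewrite author's own statement) =====
-- stated objective: alternative
-- what changed: B drops A's counts dict and reset logic entirely: it dedups the keys once with dict.fromkeys, scans them in REVERSE breaking at the first special key it meets (the last one in order), counts each kept key directly with list.count, and joins the reversed parts after the prefix.
import Mathlib
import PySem

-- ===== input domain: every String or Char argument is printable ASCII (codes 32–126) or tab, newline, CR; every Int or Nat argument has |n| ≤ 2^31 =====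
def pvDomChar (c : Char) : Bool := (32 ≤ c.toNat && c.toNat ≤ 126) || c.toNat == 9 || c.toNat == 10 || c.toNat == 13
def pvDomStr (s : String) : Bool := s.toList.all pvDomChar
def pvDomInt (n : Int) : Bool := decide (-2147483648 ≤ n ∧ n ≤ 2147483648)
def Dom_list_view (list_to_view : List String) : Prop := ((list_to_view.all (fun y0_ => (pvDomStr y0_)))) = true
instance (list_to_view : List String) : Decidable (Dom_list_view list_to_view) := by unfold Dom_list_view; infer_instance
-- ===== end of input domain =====

-- B dedups the keys once with dict.fromkeys, then scans them in REVERSE, stopping at the first special key (the last one in order) and counting each kept key with list.count — A's counts dict, enumerate index and reset logic are gone (alternative decomposition, same cost class).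


-- ===== PORT A =====
-- x == "free" or x[:5] == "EVENT"  (the special-key test, verbatim in both Pythons)
def pvSpecial (x : String) : Bool :=
  x == "free" || PySem.List.slice x.toList none (some 5) == "EVENT".toList

def list_view (list_to_view : List String) : String :=
  let list_dict := list_to_view.foldl
    (fun d x => if d.contains x then d.modify x 0 (· + 1) else d.insert x (1 : Int))
    PySem.Dict.empty
  -- for i, x in enumerate(list(list_dict.keys())) … (list_dict[x] with x a key, so getD is exact)
  String.ofList ((PySem.List.enumerate list_dict.keys 0).foldl
    (fun acc p =>
      if pvSpecial p.2 then p.2.toList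
      else if p.1 == (list_dict.size : Int) - 1 then
        acc ++ (PySem.Int.toChars (list_dict.getD p.2 0) ++ " ".toList ++ p.2.toList)
      else
        acc ++ (PySem.Int.toChars (list_dict.getD p.2 0) ++ " ".toList ++ p.2.toList ++ ", ".toList))
    [])

-- ===== PORT B =====
-- str(list_to_view.count(x)) + " " + x
def pvRender (l : List String) (x : String) : List Char :=
  PySem.Int.toChars (PySem.List.count l x : Int) ++ " ".toList ++ x.toList

-- the 'for x in reversed(keys): … break' loop (early exit = stop recursing)
def pvBloop (l : List String) : List String → List (List Char) → (List Char × List (List Char))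
  | [], parts => ([], parts)
  | x :: rest, parts =>
    if pvSpecial x then (x.toList, parts)
    else pvBloop l rest (parts ++ [pvRender l x])

def list_view_alt (list_to_view : List String) : String :=
  let keys := PySem.List.dedup list_to_view
  let r := pvBloop list_to_view keys.reverse []
  String.ofList (r.1 ++ PySem.Chars.join ", ".toList r.2.reverse)

-- ===== PRECONDITION & SPEC =====
def Spec_list_view (list_to_view : List String) (out : String) : Prop := out = list_view_alt list_to_view
instance (list_to_view : List String) (out : String) : Decidable (Spec_list_view list_to_view out) := by unfold Spec_list_view; infer_instance

-- ===== CLAIM =====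
def Claim_equal_list_view : Prop := ∀ (list_to_view : List String), Dom_list_view list_to_view → Spec_list_view list_to_view (list_view list_to_view)

-- ===== LEMMAS AND PROOFS =====

-- the string A's accumulator holds after a prefix: rendered parts plus a trailing ", " when nonempty
def pvJoinT (parts : List (List Char)) : List Char :=
  match parts with
  | [] => []
  | _ => PySem.Chars.join ", ".toList parts ++ ", ".toList

theorem pv_join_snoc (parts : List (List Char)) (q : List Char) :
    PySem.Chars.join ", ".toList (parts ++ [q]) = pvJoinT parts ++ q := by
  induction parts with
  | nil => simp [pvJoinT, PySem.Chars.join_singleton]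
  | cons a rest ih =>
    cases rest with
    | nil => simp [pvJoinT, PySem.Chars.join_cons_cons, PySem.Chars.join_singleton, List.append_assoc]
    | cons b rest' =>
      have h1 : (a :: b :: rest') ++ [q] = a :: b :: (rest' ++ [q]) := by simp
      rw [List.cons_append] at ih
      rw [h1, PySem.Chars.join_cons_cons, ih]
      simp [pvJoinT, PySem.Chars.join_cons_cons, List.append_assoc]

theorem pv_joinT_snoc (parts : List (List Char)) (q : List Char) :
    pvJoinT (parts ++ [q]) = pvJoinT parts ++ q ++ ", ".toList := by
  cases parts with
  | nil => simp [pvJoinT, PySem.Chars.join_singleton]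
  | cons a rest => simp only [pvJoinT, pv_join_snoc]; rfl

-- A's two fold steps build the same counts dict as the Counter fold
theorem pv_step_eq :
    (fun (d : PySem.Dict String Int) x => if d.contains x then d.modify x 0 (· + 1) else d.insert x (1 : Int))
      = (fun (d : PySem.Dict String Int) x => d.insert x (d.getD x 0 + 1)) := by
  funext d x
  by_cases h : d.contains x = true
  · simp [h, PySem.Dict.modify]
  · have hb : d.contains x = false := by simpa using h
    have h0 : d.getD x 0 = 0 := PySem.Dict.getD_of_not_contains d 0 hb
    simp [h, h0]

-- A's indexed comma loop over a nonempty suffix of the keys equals a reset-style (prefix, parts) fold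
theorem pv_loop_eq (f : String → Bool) (g : String → List Char) (n : Nat) :
    ∀ (ks : List String) (i : Nat) (st : List Char × List (List Char)),
      i + ks.length = n → ks ≠ [] →
      (PySem.List.enumerate ks (i : Int)).foldl
        (fun acc p =>
          if f p.2 then p.2.toList
          else if p.1 == (n : Int) - 1 then acc ++ g p.2
          else acc ++ (g p.2 ++ ", ".toList))
        (st.1 ++ pvJoinT st.2)
      = (ks.foldl (fun st x => if f x then (x.toList, []) else (st.1, st.2 ++ [g x])) st).1
          ++ PySem.Chars.join ", ".toList
              (ks.foldl (fun st x => if f x then (x.toList, []) else (st.1, st.2 ++ [g x])) st).2 := by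
  intro ks
  induction ks with
  | nil => intro i st h hne; exact absurd rfl hne
  | cons x rest ih =>
    intro i st h _
    rw [PySem.List.enumerate_cons]
    cases rest with
    | nil =>
      have hi : ((i : Int) == (n : Int) - 1) = true := by
        simp only [List.length_cons, List.length_nil] at h; simp; omega
      by_cases hf : f x = true
      · simp [PySem.List.enumerate_nil, hf, PySem.Chars.join_nil]
      · simp only [PySem.List.enumerate_nil, List.foldl_cons, List.foldl_nil, hf,
          Bool.false_eq_true, if_false, hi, if_true]
        rw [pv_join_snoc]
        simp [pvJoinT, List.append_assoc]
    | cons y rest' =>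
      have hi : ((i : Int) == (n : Int) - 1) = false := by
        simp only [List.length_cons] at h; simp; omega
      have hlen : (i + 1) + (y :: rest').length = n := by
        simp only [List.length_cons] at h ⊢; omega
      by_cases hf : f x = true
      · have := ih (i + 1) (x.toList, []) hlen (by simp)
        simp only [pvJoinT, List.append_nil, List.foldl_cons] at this
        push_cast at this
        simp only [List.foldl_cons, hf, if_true]
        exact this
      · have := ih (i + 1) (st.1, st.2 ++ [g x]) hlen (by simp)
        simp only [List.foldl_cons] at this
        push_cast at this
        have hacc : st.1 ++ pvJoinT st.2 ++ (g x ++ ", ".toList)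
            = st.1 ++ pvJoinT (st.2 ++ [g x]) := by
          rw [pv_joinT_snoc]; simp [List.append_assoc]
        simp only [List.foldl_cons, hf, Bool.false_eq_true, if_false, hi]
        rw [hacc]
        exact this

-- B's break loop only ever APPENDS to its parts accumulator
theorem pv_bloop_acc (l : List String) (ks : List String) (parts : List (List Char)) :
    pvBloop l ks parts = ((pvBloop l ks []).1, parts ++ (pvBloop l ks []).2) := by
  induction ks generalizing parts with
  | nil => simp [pvBloop]
  | cons x rest ih =>
    by_cases hf : pvSpecial x = true
    · simp [pvBloop, hf]
    · simp only [pvBloop, hf, Bool.false_eq_true, if_false]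
      rw [ih (parts ++ [pvRender l x]), ih ([] ++ [pvRender l x])]
      simp [List.append_assoc]

-- with no special key B's break loop just renders everything
theorem pv_bloop_no_special (l : List String) (ks : List String)
    (h : ks.any pvSpecial = false) :
    pvBloop l ks [] = ([], ks.map (pvRender l)) := by
  induction ks with
  | nil => simp [pvBloop]
  | cons x rest ih =>
    simp only [List.any_cons, Bool.or_eq_false_iff] at h
    rw [pvBloop, if_neg (by simp [h.1]), pv_bloop_acc]
    rw [ih h.2]
    simp

-- core: the reset-style left fold over the keys equals B's reverse scan with break
theorem pv_main (l : List String) (ks : List String) :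
    ∀ st : List Char × List (List Char),
    ks.foldl (fun st x => if pvSpecial x then (x.toList, []) else (st.1, st.2 ++ [pvRender l x])) st
      = if ks.any pvSpecial = true
        then ((pvBloop l ks.reverse []).1, (pvBloop l ks.reverse []).2.reverse)
        else (st.1, st.2 ++ (pvBloop l ks.reverse []).2.reverse) := by
  induction ks using List.reverseRecOn with
  | nil => intro st; simp [pvBloop]
  | append_singleton ys x ih =>
    intro st
    rw [List.foldl_append, List.reverse_append]
    simp only [List.reverse_singleton, List.singleton_append, List.foldl_cons, List.foldl_nil]
    by_cases hf : pvSpecial x = true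
    · simp [pvBloop, hf]
    · have hb : pvBloop l (x :: ys.reverse) [] =
          ((pvBloop l ys.reverse []).1, [pvRender l x] ++ (pvBloop l ys.reverse []).2) := by
        rw [pvBloop, if_neg (by simp [hf])]
        exact pv_bloop_acc l ys.reverse [pvRender l x]
      rw [ih st]
      by_cases ha : ys.any pvSpecial = true
      · simp [ha, hf, hb]
      · simp [ha, hf, hb, List.append_assoc]

-- ===== VERDICT =====
theorem list_view_spec : Claim_equal_list_view := by
  intro l _
  unfold Spec_list_view list_view list_view_alt
  rw [pv_step_eq, PySem.Dict.foldl_insert_getD_add_one_eq_counter]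
  dsimp only
  rw [PySem.Dict.keys_counter, PySem.List.dedup_eq_ofList]
  have hsz : (PySem.Set.ofList l).length = (PySem.Dict.counter l).size := by
    rw [← PySem.Dict.keys_counter]; simp [PySem.Dict.keys, PySem.Dict.size]
  cases hk : PySem.Set.ofList l with
  | nil => simp [pvBloop, PySem.Chars.join_nil]
  | cons k ks =>
    refine congrArg String.ofList ?_
    have hA := pv_loop_eq pvSpecial (pvRender l) (PySem.Dict.counter l).size
      (k :: ks) 0 ([], []) (by rw [← hk]; omega) (by simp)
    have hg : (fun acc (p : Int × String) =>
          if pvSpecial p.2 then p.2.toList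
          else if p.1 == ((PySem.Dict.counter l).size : Int) - 1 then
            acc ++ (PySem.Int.toChars ((PySem.Dict.counter l).getD p.2 0) ++ " ".toList ++ p.2.toList)
          else
            acc ++ (PySem.Int.toChars ((PySem.Dict.counter l).getD p.2 0) ++ " ".toList ++ p.2.toList ++ ", ".toList))
        = (fun acc (p : Int × String) =>
          if pvSpecial p.2 then p.2.toList
          else if p.1 == ((PySem.Dict.counter l).size : Int) - 1 then acc ++ pvRender l p.2
          else acc ++ (pvRender l p.2 ++ ", ".toList)) := by
      funext acc p
      simp [pvRender, PySem.Dict.getD_counter, PySem.List.count_eq, List.append_assoc]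
    simp only [pvJoinT, List.append_nil, Nat.cast_zero] at hA
    rw [hg, hA, pv_main l (k :: ks) ([], [])]
    by_cases ha : (k :: ks).any pvSpecial = true
    · simp [ha]
    · have hns := pv_bloop_no_special l (k :: ks).reverse
        (by simp only [List.any_reverse]; simpa using ha)
      simp only [ha, if_false, Bool.false_eq_true]
      rw [hns]
      simp
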